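-- pv_equiv track=rewrite | github.com/BlockchainCommons/bc-translations | python/dcbor/src/dcbor/diag.py | _joined
-- ===== SOURCE A (Python) =====
-- def _joined(elements: list[str], item_separator: str, pair_separator: str | None) -> str:
--     pair_sep = pair_separator if pair_separator is not None else item_separator
--     result: list[str] = []
--     length = len(elements)
--     for i, elem in enumerate(elements):
--         result.append(elem)
--         if i != length - 1:
--             if i & 1 != 0:
--                 result.append(item_separator)
--             else:
--                 result.append(pair_sep)
--     return "".join(result)
-- ===== SOURCE B (Python) =====
-- def _joined(elements: list[str], item_separator: str, pair_separator: str | None) -> str: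
--     pair_sep = pair_separator if pair_separator is not None else item_separator
--
--     def groups(xs: list[str]) -> list[str]:
--         # split into consecutive chunks of two; each chunk is joined with pair_sep
--         if len(xs) <= 2:
--             return [pair_sep.join(xs)]
--         return [pair_sep.join(xs[:2])] + groups(xs[2:])
--
--     return item_separator.join(groups(elements))
-- ===== Notes on version B (the rewrite author's own statement) =====
-- stated objective: alternative
-- what changed: Replaces the flat index loop with its parity test and last-element check by a two-level join: the list is split into consecutive chunks of two joined with pair_sep, and the chunk strings are joined with item_separator.
import Mathlib
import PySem

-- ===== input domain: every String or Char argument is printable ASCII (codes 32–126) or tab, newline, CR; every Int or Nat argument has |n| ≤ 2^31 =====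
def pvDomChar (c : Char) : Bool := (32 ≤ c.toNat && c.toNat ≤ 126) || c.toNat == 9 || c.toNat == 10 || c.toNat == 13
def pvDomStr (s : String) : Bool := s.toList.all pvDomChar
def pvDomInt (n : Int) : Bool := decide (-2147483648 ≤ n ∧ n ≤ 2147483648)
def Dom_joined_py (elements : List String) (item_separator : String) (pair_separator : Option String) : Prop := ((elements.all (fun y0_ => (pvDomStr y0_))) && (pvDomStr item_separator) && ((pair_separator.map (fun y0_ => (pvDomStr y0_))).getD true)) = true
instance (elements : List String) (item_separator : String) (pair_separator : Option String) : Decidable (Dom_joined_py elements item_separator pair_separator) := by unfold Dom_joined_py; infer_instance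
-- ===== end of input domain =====

-- ===== PORT A =====
-- B replaces A's flat index loop (parity test + last-element check) by a two-level join:
-- consecutive pairs joined with pair_sep, then the chunks joined with item_separator.
-- Port of A's for-loop over enumerate(elements): i is the loop index (always ≥ 0, so
-- Python's `i & 1` is Nat's `i &&& 1`, exact), result the accumulated list.
def joined_aLoop (item pair : String) (n : Nat) : Nat → List String → List String → List String
  | _, [], result => result
  | i, elem :: rest, result =>
    let result := result ++ [elem]
    let result :=
      if i ≠ n - 1 then
        if i &&& 1 ≠ 0 then result ++ [item] else result ++ [pair]
      else result
    joined_aLoop item pair n (i + 1) rest result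

def joined_py (elements : List String) (item_separator : String) (pair_separator : Option String) : String :=
  let pair_sep := match pair_separator with | some p => p | none => item_separator
  let result := joined_aLoop item_separator pair_sep elements.length 0 elements []
  PySem.Str.join "" result

-- ===== PORT B =====
-- groups(xs) from Source B: chunks of two, each joined with pair_sep (len(xs) <= 2 test,
-- xs[:2] and xs[2:], written as the corresponding pattern match).
def joined_bGroups (pair : String) : List String → List String
  | [] => [PySem.Str.join pair []]
  | [a] => [PySem.Str.join pair [a]]
  | [a, b] => [PySem.Str.join pair [a, b]]
  | a :: b :: c :: t => PySem.Str.join pair [a, b] :: joined_bGroups pair (c :: t)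

def joined_py_alt (elements : List String) (item_separator : String) (pair_separator : Option String) : String :=
  let pair_sep := match pair_separator with | some p => p | none => item_separator
  PySem.Str.join item_separator (joined_bGroups pair_sep elements)

-- ===== PRECONDITION & SPEC =====
def Spec_joined_py (elements : List String) (item_separator : String) (pair_separator : Option String) (out : String) : Prop := out = joined_py_alt elements item_separator pair_separator
instance (elements : List String) (item_separator : String) (pair_separator : Option String) (out : String) : Decidable (Spec_joined_py elements item_separator pair_separator out) := by unfold Spec_joined_py; infer_instance

-- ===== CLAIM (what is proved, stated in full; the proofs are below) =====
def Claim_equal_joined_py : Prop := ∀ (elements : List String) (item_separator : String) (pair_separator : Option String), Dom_joined_py elements item_separator pair_separator → Spec_joined_py elements item_separator pair_separator (joined_py elements item_separator pair_separator)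

-- ===== LEMMAS AND PROOFS =====

-- the character-level contribution of A's loop from index i on (sep after elem unless last)
def joined_Jspec (I P : List Char) (n : Nat) : Nat → List String → List Char
  | _, [] => []
  | i, e :: rest =>
    e.toList ++ (if i ≠ n - 1 then (if i % 2 ≠ 0 then I else P) else []) ++
      joined_Jspec I P n (i + 1) rest

theorem joined_flatten_join (l : List (List Char)) : PySem.Chars.join [] l = l.flatten := by
  induction l with
  | nil => simp [PySem.Chars.join_nil]
  | cons x l ih =>
    cases l with
    | nil => simp [PySem.Chars.join_singleton]
    | cons y t => simp [PySem.Chars.join_cons_cons, ih]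

theorem joined_aLoop_flatten (item pair : String) (n : Nat) (xs : List String)
    (i : Nat) (res : List String) :
    ((joined_aLoop item pair n i xs res).map String.toList).flatten
      = (res.map String.toList).flatten ++ joined_Jspec item.toList pair.toList n i xs := by
  induction xs generalizing i res with
  | nil => simp [joined_aLoop, joined_Jspec]
  | cons e rest ih =>
    simp only [joined_aLoop, joined_Jspec, Nat.and_one_is_mod]
    split_ifs with h1 h2 <;>
      simp [ih, List.append_assoc]

theorem joined_bGroups_ne_nil (pair : String) (xs : List String) :
    joined_bGroups pair xs ≠ [] := by
  match xs with
  | [] => simp [joined_bGroups]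
  | [a] => simp [joined_bGroups]
  | [a, b] => simp [joined_bGroups]
  | a :: b :: c :: t => simp [joined_bGroups]

theorem joined_Jspec_eq (item pair : String) (xs : List String) (i : Nat)
    (hi : i % 2 = 0) :
    joined_Jspec item.toList pair.toList (i + xs.length) i xs
      = PySem.Chars.join item.toList ((joined_bGroups pair xs).map String.toList) := by
  induction xs using joined_bGroups.induct generalizing i with
  | case1 =>
    simp [joined_Jspec, joined_bGroups, PySem.Chars.join_singleton,
      PySem.Str.toList_join, PySem.Chars.join_nil]
  | case2 a =>
    simp [joined_Jspec, joined_bGroups, PySem.Chars.join_singleton, PySem.Str.toList_join]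
  | case3 a b =>
    have h1 : i ≠ i + 2 - 1 := by omega
    have h2 : ¬ (i + 1 ≠ i + 2 - 1) := by omega
    have h3 : ¬ (i % 2 ≠ 0) := by omega
    simp [joined_Jspec, joined_bGroups, PySem.Chars.join_singleton, PySem.Str.toList_join,
      PySem.Chars.join_cons_cons, h3]
  | case4 a b c t ih =>
    obtain ⟨y, ys, hy⟩ := List.exists_cons_of_ne_nil (joined_bGroups_ne_nil pair (c :: t))
    have ih' := ih (i + 2) (by omega)
    have e1 : i + (a :: b :: c :: t).length = i + 2 + (c :: t).length := by
      simp only [List.length_cons]; omega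
    rw [e1]
    set n := i + 2 + (c :: t).length with hn
    have h1 : i ≠ n - 1 := by simp only [hn, List.length_cons]; omega
    have h2 : i + 1 ≠ n - 1 := by simp only [hn, List.length_cons]; omega
    have h3 : ¬ (i % 2 ≠ 0) := by omega
    have h4 : (i + 1) % 2 ≠ 0 := by omega
    have h5 : (i + 1 + 1) % 2 ≠ 1 := by omega
    rw [show joined_bGroups pair (a :: b :: c :: t)
          = PySem.Str.join pair [a, b] :: joined_bGroups pair (c :: t) from rfl]
    rw [List.map_cons, hy, List.map_cons, PySem.Chars.join_cons_cons,
      ← List.map_cons, ← hy, ← ih']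
    simp [joined_Jspec, h1, h2, h3, h4, h5, PySem.Str.toList_join,
      PySem.Chars.join_cons_cons, PySem.Chars.join_singleton, List.append_assoc]

-- ===== VERDICT (by name: the statement is the Claim_ definition above) =====
theorem joined_py_spec : Claim_equal_joined_py := by
  intro elements item_separator pair_separator _
  unfold Spec_joined_py joined_py joined_py_alt
  set pair := (match pair_separator with | some p => p | none => item_separator) with hp
  show PySem.Str.join "" (joined_aLoop item_separator pair elements.length 0 elements []) = _
  unfold PySem.Str.join
  congr 1
  rw [show ("" : String).toList = [] from rfl, joined_flatten_join, joined_aLoop_flatten]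
  simpa using joined_Jspec_eq item_separator pair elements 0 rfl
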